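-- pv_equiv track=rewrite | github.com/RxndyOG/BachelorsThesisStateAbstractionStefanWerner | Bachelor/MatrixOperation.py | state_edge_left
-- ===== SOURCE A (Python) =====
-- def state_edge_left(state):
--     edged_state = state.copy()
--
--     for i in edged_state:
--         for j in range(len(i)):
--             if j < len(i) - 1:
--                 if (i[j] == 0 and i[j+1] != 0 and i[j+1] != 1):
--                     i[j] = 1
--
--     for i in edged_state:
--         for j in range(len(i)):
--             if i[j] == 1:
--                 i[j] = 2
--
--     return edged_state
-- ===== SOURCE B (Python) =====
-- def state_edge_left(state):
--     # Pure rebuild: same return value as A; unlike A it does not mutate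
--     # the caller's inner row lists.
--     def edge_row(row):
--         out = [2 if a == 1 or (a == 0 and b != 0 and b != 1) else a
--                for a, b in zip(row, row[1:])]
--         if row:
--             out.append(2 if row[-1] == 1 else row[-1])
--         return out
--     return [edge_row(row) for row in state]
-- ===== Notes on version B (the rewrite author's own statement) =====
-- stated objective: simpler
-- what changed: B replaces A's two in-place mutation passes with the intermediate sentinel 1 by a single pure per-row comprehension over (cell, right-neighbour) pairs that decides each output cell directly; B builds fresh rows instead of mutating the shared ones (return value identical).
import Mathlib
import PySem

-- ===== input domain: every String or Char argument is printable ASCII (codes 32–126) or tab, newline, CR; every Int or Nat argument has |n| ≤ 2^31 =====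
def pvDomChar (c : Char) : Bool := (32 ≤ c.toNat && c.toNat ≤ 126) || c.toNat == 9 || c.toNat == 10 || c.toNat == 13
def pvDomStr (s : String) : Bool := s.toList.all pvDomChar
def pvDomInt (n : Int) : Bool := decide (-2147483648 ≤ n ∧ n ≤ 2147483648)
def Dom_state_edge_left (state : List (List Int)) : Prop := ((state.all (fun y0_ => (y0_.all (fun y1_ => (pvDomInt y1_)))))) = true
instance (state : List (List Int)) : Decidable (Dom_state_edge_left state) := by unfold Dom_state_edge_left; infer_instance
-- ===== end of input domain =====

-- B replaces A's two in-place mutation passes (sentinel 1, then 1 → 2) by one pure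
-- per-row pass over (cell, right-neighbour) pairs; return value identical.
-- Side effects differ: A mutates the caller's inner row lists (shallow copy), B builds
-- fresh rows — the equivalence proved here is about the RETURN value only.

-- ===== PORT A =====
-- first mutation pass on one row: for j in range(len(i)): if j < len(i)-1 and
-- i[j]==0 and i[j+1]!=0 and i[j+1]!=1: i[j] = 1   (reads/writes on the current row)
def pass1Row (i : List Int) : List Int :=
  (List.range i.length).foldl
    (fun r j =>
      if j + 1 < i.length then
        (if r.getD j 0 = 0 ∧ r.getD (j+1) 0 ≠ 0 ∧ r.getD (j+1) 0 ≠ 1 then r.set j 1 else r)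
      else r) i

-- second mutation pass on one row: for j in range(len(i)): if i[j]==1: i[j] = 2
def pass2Row (i : List Int) : List Int :=
  (List.range i.length).foldl
    (fun r j => if r.getD j 0 = 1 then r.set j 2 else r) i

def state_edge_left (state : List (List Int)) : List (List Int) :=
  ((state.map pass1Row).map pass2Row)

-- ===== PORT B =====
-- one pure pass: zip(row, row[1:]) decides each cell from its original neighbour;
-- the last cell (if any) only turns 1 into 2
def edgeRow (row : List Int) : List Int :=
  let body := (row.zip row.tail).map
    (fun p => if p.1 = 1 ∨ (p.1 = 0 ∧ p.2 ≠ 0 ∧ p.2 ≠ 1) then 2 else p.1)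
  match row.getLast? with
  | none => body
  | some l => body ++ [if l = 1 then 2 else l]

def state_edge_left_alt (state : List (List Int)) : List (List Int) :=
  state.map edgeRow

-- ===== PRECONDITION & SPEC =====
def Spec_state_edge_left (state : List (List Int)) (out : List (List Int)) : Prop := out = state_edge_left_alt state
instance (state : List (List Int)) (out : List (List Int)) : Decidable (Spec_state_edge_left state out) := by unfold Spec_state_edge_left; infer_instance

-- ===== CLAIM (what is proved, stated in full; the proofs are below) =====
def Claim_equal_state_edge_left : Prop := ∀ (state : List (List Int)), Dom_state_edge_left state → Spec_state_edge_left state (state_edge_left state)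

-- ===== LEMMAS AND PROOFS =====

-- recursive characterisation of A's first pass
def g1 : List Int → List Int
  | [] => []
  | [a] => [a]
  | a :: b :: rest => (if a = 0 ∧ b ≠ 0 ∧ b ≠ 1 then 1 else a) :: g1 (b :: rest)

-- shift lemma, pass 2: indices ≥ 1 leave the head alone
theorem pass2_shift (idxs : List Nat) (x : Int) :
    ∀ xs : List Int,
      List.foldl (fun r j => if r.getD j 0 = 1 then r.set j 2 else r)
        (x :: xs) (idxs.map Nat.succ)
      = x :: List.foldl (fun r j => if r.getD j 0 = 1 then r.set j 2 else r) xs idxs := by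
  induction idxs with
  | nil => intro xs; simp
  | cons j t ih =>
      intro xs
      simp only [List.map_cons, List.foldl_cons, List.getD_cons_succ, List.set_cons_succ]
      split_ifs with h
      · exact ih (xs.set j 2)
      · exact ih xs

theorem pass2_eq_map (xs : List Int) :
    List.foldl (fun r j => if r.getD j 0 = 1 then r.set j 2 else r) xs (List.range xs.length)
      = xs.map (fun a => if a = 1 then 2 else a) := by
  induction xs with
  | nil => simp
  | cons x t ih =>
      simp only [List.length_cons, List.range_succ_eq_map, List.foldl_cons,
        List.getD_cons_zero, List.set_cons_zero, List.map_cons]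
      split_ifs with h
      · rw [pass2_shift, ih]
      · rw [pass2_shift, ih]

theorem pass2Row_eq (i : List Int) : pass2Row i = i.map (fun a => if a = 1 then 2 else a) := by
  simpa [pass2Row] using pass2_eq_map i

-- shift lemma, pass 1: indices ≥ 1 read/write only the tail; the length bound shifts by one
theorem pass1_shift (idxs : List Nat) (x : Int) (n : Nat) :
    ∀ xs : List Int,
      List.foldl (fun r j => if j + 1 < n + 1 then
          (if r.getD j 0 = 0 ∧ r.getD (j+1) 0 ≠ 0 ∧ r.getD (j+1) 0 ≠ 1 then r.set j 1 else r)
        else r) (x :: xs) (idxs.map Nat.succ)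
      = x :: List.foldl (fun r j => if j + 1 < n then
          (if r.getD j 0 = 0 ∧ r.getD (j+1) 0 ≠ 0 ∧ r.getD (j+1) 0 ≠ 1 then r.set j 1 else r)
        else r) xs idxs := by
  induction idxs with
  | nil => intro xs; simp
  | cons j t ih =>
      intro xs
      simp only [List.map_cons, List.foldl_cons, List.getD_cons_succ, List.set_cons_succ]
      by_cases hb : j + 1 < n
      · have hb' : j.succ + 1 < n + 1 := by omega
        rw [if_pos hb', if_pos hb]
        split_ifs with hi
        · exact ih (xs.set j 1)
        · exact ih xs
      · have hb' : ¬ j.succ + 1 < n + 1 := by omega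
        rw [if_neg hb', if_neg hb]
        exact ih xs

theorem pass1_eq_g1 (xs : List Int) :
    List.foldl (fun r j => if j + 1 < xs.length then
        (if r.getD j 0 = 0 ∧ r.getD (j+1) 0 ≠ 0 ∧ r.getD (j+1) 0 ≠ 1 then r.set j 1 else r)
      else r) xs (List.range xs.length)
      = g1 xs := by
  induction xs with
  | nil => simp [g1]
  | cons a t ih =>
      cases t with
      | nil => simp [g1]
      | cons b rest =>
          simp only [List.length_cons] at ih ⊢
          rw [List.range_succ_eq_map, List.foldl_cons]
          have h0 : (0:Nat) + 1 < rest.length + 1 + 1 := by omega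
          rw [if_pos h0]
          simp only [List.getD_cons_zero, List.getD_cons_succ, List.set_cons_zero, g1]
          split_ifs with h
          · exact (pass1_shift (List.range (rest.length + 1)) 1 (rest.length + 1)
              (b :: rest)).trans (congrArg (List.cons 1) ih)
          · exact (pass1_shift (List.range (rest.length + 1)) a (rest.length + 1)
              (b :: rest)).trans (congrArg (List.cons a) ih)

theorem pass1Row_eq (i : List Int) : pass1Row i = g1 i := by
  simpa [pass1Row] using pass1_eq_g1 i

-- peeling one cell off B's row function
theorem edgeRow_cons_cons (a b : Int) (rest : List Int) :
    edgeRow (a :: b :: rest) =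
      (if a = 1 ∨ (a = 0 ∧ b ≠ 0 ∧ b ≠ 1) then 2 else a) :: edgeRow (b :: rest) := by
  rcases e : (b :: rest).getLast? with _ | l
  · simp at e
  · simp [edgeRow, e, List.getLast?_cons_cons]

-- B's row function equals (1 ↦ 2) mapped over g1
theorem edgeRow_eq (row : List Int) :
    (g1 row).map (fun a => if a = 1 then 2 else a) = edgeRow row := by
  induction row with
  | nil => simp [g1, edgeRow]
  | cons a t ih =>
      cases t with
      | nil => simp [g1, edgeRow]
      | cons b rest =>
          rw [edgeRow_cons_cons, ← ih]
          simp only [g1, List.map_cons]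
          congr 1
          by_cases h : a = 0 ∧ b ≠ 0 ∧ b ≠ 1
          · obtain ⟨h1, h2, h3⟩ := h
            simp [h1, h2, h3]
          · by_cases ha : a = 1 <;> simp [h, ha]

theorem row_eq (i : List Int) : pass2Row (pass1Row i) = edgeRow i := by
  rw [pass1Row_eq, pass2Row_eq, edgeRow_eq]

-- ===== VERDICT (by name: the statement is the Claim_ definition above) =====
theorem state_edge_left_spec : Claim_equal_state_edge_left := by
  intro state _
  unfold Spec_state_edge_left state_edge_left state_edge_left_alt
  rw [List.map_map]
  exact List.map_congr_left (fun i _ => row_eq i)
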